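-- pv_equiv track=rewrite | github.com/ZWP-FlyZ/AppAlgorithm | src/dynamic_planning/max_m_sep_sub_sum.py | mss_m_sep
-- ===== SOURCE A (Python) =====
-- def mss_m_sep(a,m):
--     n = len(a);
--     if n<m or m<1:return 0;
--     b=[0]*(n+1); # 当前行的结果情况
--     c=[0]*(n+1); # 上一行的b(i-1,t) 的最大值
--
--     for i in range(1,m+1):
--         b[i]=b[i-1]+a[i-1];
--         c[i-1]=b[i];
--         c_max = b[i];
--         for j in range(i+1,i+n-m+1):
--             if (b[j-1]>c[j-1]):b[j]=b[j-1]+a[j-1];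
--             else:b[j]=c[j-1]+a[j-1];
--             c[j-1] = c_max;
--             if (c_max < b[j]): c_max=b[j];
--         c[i+n-m]=c_max;
--
--     asum = 0;
--     for j in range(m,n+1):
--         if asum<b[j]:asum=b[j];
--     return asum;
--
--     pass;
-- ===== SOURCE B (Python) =====
-- def mss_m_sep(a, m):
--     # One left-to-right pass over the input, carrying per-count columns
--     # end[t] / best[t] (None = "exactly t subarrays do not fit yet").
--     n = len(a)
--     if n < m or m < 1:
--         return 0
--     end = [None] * (m + 1)       # end[t]: exactly t subarrays, t-th ending at the current element
--     best = [0] + [None] * m      # best[t]: exactly t subarrays inside the prefix seen so far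
--     for x in a:
--         end = [None] + [None if e is None and p is None
--                         else x + (p if e is None else e if p is None else e if e >= p else p)
--                         for e, p in zip(end[1:], best)]
--         best = [e if b is None else b if e is None else e if b < e else b
--                 for b, e in zip(best, end)]
--     return max(0, best[m])
-- ===== Notes on version B (the rewrite author's own statement) =====
-- stated objective: alternative
-- what changed: Transposes A's loop nest: instead of m sequential passes over the array with in-place rolling b/c arrays and a c_max carry, B makes a single left-to-right pass over the input, rebuilding at each element the per-count columns end[0..m]/best[0..m] (None = 'exactly t subarrays do not fit') with comprehensions.
import Mathlib
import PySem

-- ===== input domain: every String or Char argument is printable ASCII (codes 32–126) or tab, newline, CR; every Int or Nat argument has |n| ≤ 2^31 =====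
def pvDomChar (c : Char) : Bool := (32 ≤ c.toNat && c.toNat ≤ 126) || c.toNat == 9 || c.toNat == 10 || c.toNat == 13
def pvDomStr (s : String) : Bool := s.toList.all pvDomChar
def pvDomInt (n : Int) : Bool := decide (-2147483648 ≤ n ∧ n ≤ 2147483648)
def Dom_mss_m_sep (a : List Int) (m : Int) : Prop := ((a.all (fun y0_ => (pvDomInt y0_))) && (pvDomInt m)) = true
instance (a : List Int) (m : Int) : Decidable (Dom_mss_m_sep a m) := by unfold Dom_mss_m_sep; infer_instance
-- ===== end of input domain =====

-- B transposes A's loop nest: one left-to-right pass over the input carrying per-count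
-- end/best columns (Option, none = impossible) rebuilt at each element; same return value.

-- ===== PORT A =====
def mss_m_sep (a : List Int) (m : Int) : Int :=
  let n : Int := a.length
  if n < m ∨ m < 1 then 0
  else
    let b : List Int := List.replicate (a.length + 1) 0
    let c : List Int := List.replicate (a.length + 1) 0
    let bc := (PySem.List.pyRange 1 (m + 1) 1).foldl
      (fun (bc : List Int × List Int) i =>
        let b := PySem.List.pySetD bc.1 i
          (PySem.List.pyGetD bc.1 (i - 1) 0 + PySem.List.pyGetD a (i - 1) 0)
        let c := PySem.List.pySetD bc.2 (i - 1) (PySem.List.pyGetD b i 0)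
        let cmax := PySem.List.pyGetD b i 0
        let st := (PySem.List.pyRange (i + 1) (i + n - m + 1) 1).foldl
          (fun (st : List Int × List Int × Int) j =>
            let b := if PySem.List.pyGetD st.1 (j - 1) 0 > PySem.List.pyGetD st.2.1 (j - 1) 0
              then PySem.List.pySetD st.1 j
                (PySem.List.pyGetD st.1 (j - 1) 0 + PySem.List.pyGetD a (j - 1) 0)
              else PySem.List.pySetD st.1 j
                (PySem.List.pyGetD st.2.1 (j - 1) 0 + PySem.List.pyGetD a (j - 1) 0)
            let c := PySem.List.pySetD st.2.1 (j - 1) st.2.2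
            let cmax := if st.2.2 < PySem.List.pyGetD b j 0 then PySem.List.pyGetD b j 0 else st.2.2
            (b, c, cmax)) (b, c, cmax)
        let c := PySem.List.pySetD st.2.1 (i + n - m) st.2.2
        (st.1, c)) (b, c)
    (PySem.List.pyRange m (n + 1) 1).foldl
      (fun asum j => if asum < PySem.List.pyGetD bc.1 j 0 then PySem.List.pyGetD bc.1 j 0 else asum) 0

-- ===== PORT B =====
-- the body of Source B's 'for x in a' loop: rebuild the end/best columns at element x;
-- the conditional-expression chains of the two comprehensions are ported as matches
def pvStep (x : Int) (st : List (Option Int) × List (Option Int)) :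
    List (Option Int) × List (Option Int) :=
  -- end[1:] has only nonnegative indices, so the slice is List.drop 1 exactly
  let e := (none : Option Int) ::
    ((st.1.drop 1).zip st.2).map (fun ep =>
      match ep.1, ep.2 with
      | none, none => none                                  -- e is None and p is None
      | none, some p => some (x + p)                        -- x + p
      | some e, none => some (x + e)                        -- x + e
      | some e, some p => some (x + (if e ≥ p then e else p)))
  let b := List.zipWith (fun b e =>
    match b, e with
    | none, e => e                                          -- b is None → e
    | some b, none => some b                                -- e is None → b
    | some b, some e => if b < e then some e else some b) st.2 e
  (e, b)

def mss_m_sep_alt (a : List Int) (m : Int) : Int :=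
  let n : Int := a.length
  if n < m ∨ m < 1 then 0
  else
    let fin := a.foldl (fun st x => pvStep x st)
      (List.replicate (m.toNat + 1) (none : Option Int),
       (some 0) :: List.replicate m.toNat (none : Option Int))
    match PySem.List.pyGetD fin.2 m none with
    | some v => max 0 v
    | none => 0  -- unreachable: with 1 ≤ m ≤ n, best[m] is an int

-- ===== PRECONDITION & SPEC =====
def Spec_mss_m_sep (a : List Int) (m : Int) (out : Int) : Prop := out = mss_m_sep_alt a m
instance (a : List Int) (m : Int) (out : Int) : Decidable (Spec_mss_m_sep a m out) := by unfold Spec_mss_m_sep; infer_instance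

-- ===== CLAIM (what is proved, stated in full; the proofs are below) =====
def Claim_equal_mss_m_sep : Prop := ∀ (a : List Int) (m : Int), Dom_mss_m_sep a m → Spec_mss_m_sep a m (mss_m_sep a m)

-- ===== LEMMAS AND PROOFS =====

-- value with exactly t subarrays, the t-th ending exactly at position j (1-based prefix index)
def pvE (a : List Int) : Nat → Nat → Int
  | 0, _ => 0
  | t + 1, j =>
    if j ≤ t + 1 then pvE a t t + a.getD t 0
    else a.getD (j - 1) 0 +
      max (pvE a (t + 1) (j - 1))
        ((List.range' (t + 1) (j - 1 - t)).foldl (fun acc l => max acc (pvE a t l)) (pvE a t t))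
  termination_by t j => (t, j)
  decreasing_by all_goals first
    | exact Prod.Lex.right _ (by omega)
    | exact Prod.Lex.left _ _ (by omega)

-- prefix maximum of pvE a t over [t, k]
def pvH (a : List Int) (t k : Nat) : Int :=
  (List.range' (t + 1) (k - t)).foldl (fun acc l => max acc (pvE a t l)) (pvE a t t)

theorem pvE_zero (a : List Int) (j : Nat) : pvE a 0 j = 0 := by simp [pvE]

theorem pvE_base (a : List Int) (t j : Nat) (h : j ≤ t + 1) :
    pvE a (t + 1) j = pvE a t t + a.getD t 0 := by
  rw [pvE]; simp [h]

theorem pvE_step (a : List Int) (t j : Nat) (h : t + 1 < j) :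
    pvE a (t + 1) j = a.getD (j - 1) 0 + max (pvE a (t + 1) (j - 1)) (pvH a t (j - 1)) := by
  rw [pvE]; rw [if_neg (by omega)]; rfl

theorem pvH_self (a : List Int) (t : Nat) : pvH a t t = pvE a t t := by
  simp [pvH]

theorem pvH_succ (a : List Int) (t k : Nat) (h : t ≤ k) :
    pvH a t (k + 1) = max (pvH a t k) (pvE a t (k + 1)) := by
  unfold pvH
  have h1 : k + 1 - t = (k - t) + 1 := by omega
  have h2 : t + 1 + (k - t) = k + 1 := by omega
  rw [h1, List.range'_1_concat, h2, List.foldl_append]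
  simp

theorem pvH_zero (a : List Int) (k : Nat) : pvH a 0 k = 0 := by
  induction k with
  | zero => rw [pvH_self, pvE_zero]
  | succ k ih => rw [pvH_succ a 0 k (by omega), ih, pvE_zero]; simp

-- Option-valued column entries of B: end-here / best with exactly t subarrays
-- the option-max both comprehensions implement
def pvOmax : Option Int → Option Int → Option Int
  | none, v => v
  | some u, none => some u
  | some u, some v => some (max u v)

def pvEopt (a : List Int) (t j : Nat) : Option Int := if j < t then none else some (pvE a t j)
def pvBopt (a : List Int) (t j : Nat) : Option Int := if j < t then none else some (pvH a t j)
-- B keeps end[0] = None forever; for t ≥ 1 it is pvEopt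
def pvEB (a : List Int) (t j : Nat) : Option Int := if t = 0 then none else pvEopt a t j

theorem pvEopt_step (a : List Int) (t k : Nat) :
    (pvOmax (pvEopt a (t + 1) k) (pvBopt a t k)).map (fun v => a.getD k 0 + v) =
      pvEopt a (t + 1) (k + 1) := by
  unfold pvEopt pvBopt
  rcases lt_trichotomy k t with h | h | h
  · rw [if_pos (by omega), if_pos (by omega), if_pos (by omega)]; rfl
  · subst h
    rw [if_pos (by omega), if_neg (by omega), if_neg (by omega)]
    simp [pvOmax, pvH_self, pvE_base a k (k + 1) (by omega), Int.add_comm]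
  · rw [if_neg (by omega), if_neg (by omega), if_neg (by omega)]
    simp [pvOmax, pvE_step a t (k + 1) (by omega)]

theorem pvBopt_step (a : List Int) (t k : Nat) :
    pvOmax (pvBopt a (t + 1) k) (pvEopt a (t + 1) (k + 1)) = pvBopt a (t + 1) (k + 1) := by
  unfold pvEopt pvBopt
  rcases lt_trichotomy k t with h | h | h
  · rw [if_pos (by omega), if_pos (by omega), if_pos (by omega)]; rfl
  · subst h
    rw [if_pos (by omega), if_neg (by omega), if_neg (by omega)]
    simp [pvOmax, pvH_self]
  · rw [if_neg (by omega), if_neg (by omega), if_neg (by omega)]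
    simp [pvOmax, pvH_succ a (t + 1) k (by omega)]

-- the end-column rebuilt at element a[j] is the end-column of prefix j+1
theorem pvE_col (a : List Int) (M j : Nat) :
    ((none : Option Int) ::
      ((((List.range (M + 1)).map (fun t => pvEB a t j)).drop 1).zip
          ((List.range (M + 1)).map (fun t => pvBopt a t j))).map
        (fun ep => (pvOmax ep.1 ep.2).map (fun c => a.getD j 0 + c)))
    = (List.range (M + 1)).map (fun t => pvEB a t (j + 1)) := by
  apply List.ext_getElem
  · simp
  · intro i h1 h2
    match i with
    | 0 => simp [pvEB]
    | k + 1 =>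
      have hk : k < M := by simpa using h2
      simp only [List.getElem_cons_succ, List.getElem_map, List.getElem_zip, List.getElem_drop,
        List.getElem_range]
      have h3 : pvEB a (1 + k) j = pvEopt a (k + 1) j := by
        unfold pvEB; rw [if_neg (by omega)]; congr 1; omega
      rw [h3]
      have h4 : pvEB a (k + 1) (j + 1) = pvEopt a (k + 1) (j + 1) := by
        unfold pvEB; rw [if_neg (by omega)]
      rw [h4, ← pvEopt_step a k j]

-- the best-column update
theorem pvB_col (a : List Int) (M j : Nat) :
    List.zipWith pvOmax ((List.range (M + 1)).map (fun t => pvBopt a t j))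
      ((List.range (M + 1)).map (fun t => pvEB a t (j + 1)))
    = (List.range (M + 1)).map (fun t => pvBopt a t (j + 1)) := by
  apply List.ext_getElem
  · simp
  · intro i h1 h2
    have hi : i < M + 1 := by simpa using h2
    simp only [List.getElem_zipWith, List.getElem_map, List.getElem_range]
    match i with
    | 0 =>
      unfold pvBopt pvEB
      simp [pvOmax, pvH_zero]
    | k + 1 =>
      have h4 : pvEB a (k + 1) (j + 1) = pvEopt a (k + 1) (j + 1) := by
        unfold pvEB; rw [if_neg (by omega)]
      rw [h4, pvBopt_step a k j]

theorem pvStep_fn_e (x : Int) (ep : Option Int × Option Int) :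
    (match ep.1, ep.2 with
      | none, none => (none : Option Int)
      | none, some p => some (x + p)
      | some e, none => some (x + e)
      | some e, some p => some (x + (if e ≥ p then e else p)))
    = (pvOmax ep.1 ep.2).map (fun c => x + c) := by
  obtain ⟨u, v⟩ := ep
  cases u <;> cases v
  · rfl
  · rfl
  · rfl
  · rename_i e p
    have h : max e p = if e ≥ p then e else p := by rw [Int.max_def]; split_ifs <;> omega
    simp [pvOmax, h]

theorem pvStep_fn_b (u v : Option Int) :
    (match u, v with
      | none, e => e
      | some b, none => some b
      | some b, some e => if b < e then some e else some b)
    = pvOmax u v := by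
  cases u <;> cases v
  · rfl
  · rfl
  · rfl
  · rename_i b e
    have h : max b e = if b < e then e else b := by rw [Int.max_def]; split_ifs <;> omega
    simp only [pvOmax, h]
    split_ifs <;> rfl

theorem pvStep_spec (a : List Int) (M j : Nat) :
    pvStep (a.getD j 0)
      ((List.range (M + 1)).map (fun t => pvEB a t j),
       (List.range (M + 1)).map (fun t => pvBopt a t j)) =
    ((List.range (M + 1)).map (fun t => pvEB a t (j + 1)),
     (List.range (M + 1)).map (fun t => pvBopt a t (j + 1))) := by
  unfold pvStep
  simp only []
  rw [show (fun (ep : Option Int × Option Int) =>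
      match ep.1, ep.2 with
      | none, none => (none : Option Int)
      | none, some p => some (a.getD j 0 + p)
      | some e, none => some (a.getD j 0 + e)
      | some e, some p => some (a.getD j 0 + (if e ≥ p then e else p)))
    = (fun ep => (pvOmax ep.1 ep.2).map (fun c => a.getD j 0 + c))
    from funext fun ep => pvStep_fn_e (a.getD j 0) ep]
  rw [show (fun (b e : Option Int) =>
      match b, e with
      | none, e => e
      | some b, none => some b
      | some b, some e => if b < e then some e else some b)
    = pvOmax from funext fun u => funext fun v => pvStep_fn_b u v]
  rw [pvE_col a M j, pvB_col a M j]

theorem pvFold (a : List Int) (M : Nat) :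
    ∀ (tail : List Int) (j : Nat), j ≤ a.length → tail = a.drop j →
      tail.foldl (fun st x => pvStep x st)
        ((List.range (M + 1)).map (fun t => pvEB a t j),
         (List.range (M + 1)).map (fun t => pvBopt a t j)) =
      ((List.range (M + 1)).map (fun t => pvEB a t a.length),
       (List.range (M + 1)).map (fun t => pvBopt a t a.length)) := by
  intro tail
  induction tail with
  | nil =>
    intro j hj htail
    have hje : j = a.length := by
      by_contra hne
      have hlt : j < a.length := by omega
      rw [List.drop_eq_getElem_cons hlt] at htail
      exact List.cons_ne_nil _ _ htail.symm
    subst hje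
    simp
  | cons x rest ih =>
    intro j hj htail
    have hjlt : j < a.length := by
      by_contra hge
      have : a.drop j = [] := List.drop_eq_nil_of_le (by omega)
      rw [this] at htail
      exact List.cons_ne_nil _ _ htail
    have hdrop := List.drop_eq_getElem_cons (l := a) hjlt
    rw [hdrop] at htail
    have hx : x = a.getD j 0 := by
      have := (List.cons.injEq _ _ _ _).mp htail
      rw [this.1, List.getD_eq_getElem a 0 hjlt]
    have hrest : rest = a.drop (j + 1) := ((List.cons.injEq _ _ _ _).mp htail).2
    rw [List.foldl_cons, hx, pvStep_spec a M j]
    exact ih (j + 1) (by omega) hrest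

-- initial columns of B are the columns for the empty prefix
theorem pvInit_e (a : List Int) (M : Nat) :
    (List.replicate (M + 1) (none : Option Int))
      = (List.range (M + 1)).map (fun t => pvEB a t 0) := by
  apply List.ext_getElem
  · simp
  · intro i h1 h2
    have hi : i < M + 1 := by simpa using h1
    simp only [List.getElem_replicate, List.getElem_map, List.getElem_range]
    unfold pvEB pvEopt
    match i with
    | 0 => simp
    | k + 1 => rw [if_neg (by omega), if_pos (by omega)]

theorem pvInit_b (a : List Int) (M : Nat) :
    ((some 0) :: List.replicate M (none : Option Int))
      = (List.range (M + 1)).map (fun t => pvBopt a t 0) := by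
  apply List.ext_getElem
  · simp
  · intro i h1 h2
    match i with
    | 0 =>
      simp only [List.getElem_cons_zero, List.getElem_map, List.getElem_range]
      unfold pvBopt
      rw [if_neg (by omega), pvH_self, pvE_zero]
    | k + 1 =>
      have hk : k < M := by simpa using h1
      simp only [List.getElem_cons_succ, List.getElem_replicate, List.getElem_map,
        List.getElem_range]
      unfold pvBopt
      rw [if_pos (by omega)]

theorem alt_eq (a : List Int) (m : Int) (h1 : ¬((a.length : Int) < m ∨ m < 1)) :
    mss_m_sep_alt a m = max 0 (pvH a m.toNat a.length) := by
  obtain ⟨M, rfl⟩ : ∃ M : Nat, m = (M : Int) := ⟨m.toNat, by omega⟩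
  unfold mss_m_sep_alt
  simp only []
  rw [if_neg h1, Int.toNat_natCast, pvInit_e a M, pvInit_b a M,
    pvFold a M a 0 (by omega) (by simp), PySem.List.pyGetD_natCast]
  have hv : (List.map (fun t => pvBopt a t a.length) (List.range (M + 1))).getD M none
      = some (pvH a M a.length) := by
    rw [PySem.List.getD_map_range (fun t => pvBopt a t a.length) (M + 1) M none (by omega)]
    unfold pvBopt
    rw [if_neg (by omega)]
  show (match (List.map (fun t => pvBopt a t a.length) (List.range (M + 1))).getD M none with
    | some v => max 0 v
    | none => 0) = max 0 (pvH a M a.length)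
  rw [hv]

-- ===== A-side invariants =====
def pvAInv (a : List Int) (M i : Nat) (bc : List Int × List Int) : Prop :=
  bc.1.length = a.length + 1 ∧ bc.2.length = a.length + 1 ∧
  (∀ k, i ≤ k → k ≤ i + (a.length - M) → bc.1.getD k 0 = pvE a i k) ∧
  (∀ k, i ≤ k → k ≤ i + (a.length - M) → bc.2.getD k 0 = pvH a i k)

def pvInnerInv (a : List Int) (M i jj : Nat) (st : List Int × List Int × Int) : Prop :=
  st.1.length = a.length + 1 ∧ st.2.1.length = a.length + 1 ∧
  (∀ k, i + 1 ≤ k → k ≤ jj → st.1.getD k 0 = pvE a (i + 1) k) ∧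
  (∀ k, jj ≤ k → k ≤ i + (a.length - M) → st.2.1.getD k 0 = pvH a i k) ∧
  (∀ k, i + 1 ≤ k → k < jj → st.2.1.getD k 0 = pvH a (i + 1) k) ∧
  st.2.2 = pvH a (i + 1) jj

-- the inner loop body of port A, named for the proofs (definitionally the lambda in mss_m_sep)
def pvAStep (a : List Int) : List Int × List Int × Int → Int → List Int × List Int × Int :=
  fun st j =>
    let b := if PySem.List.pyGetD st.1 (j - 1) 0 > PySem.List.pyGetD st.2.1 (j - 1) 0
      then PySem.List.pySetD st.1 j
        (PySem.List.pyGetD st.1 (j - 1) 0 + PySem.List.pyGetD a (j - 1) 0)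
      else PySem.List.pySetD st.1 j
        (PySem.List.pyGetD st.2.1 (j - 1) 0 + PySem.List.pyGetD a (j - 1) 0)
    let c := PySem.List.pySetD st.2.1 (j - 1) st.2.2
    let cmax := if st.2.2 < PySem.List.pyGetD b j 0 then PySem.List.pyGetD b j 0 else st.2.2
    (b, c, cmax)

-- the outer loop body of port A
def pvARow (a : List Int) (n m : Int) : List Int × List Int → Int → List Int × List Int :=
  fun bc i =>
    let b := PySem.List.pySetD bc.1 i
      (PySem.List.pyGetD bc.1 (i - 1) 0 + PySem.List.pyGetD a (i - 1) 0)
    let c := PySem.List.pySetD bc.2 (i - 1) (PySem.List.pyGetD b i 0)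
    let cmax := PySem.List.pyGetD b i 0
    let st := (PySem.List.pyRange (i + 1) (i + n - m + 1) 1).foldl (pvAStep a) (b, c, cmax)
    let c := PySem.List.pySetD st.2.1 (i + n - m) st.2.2
    (st.1, c)

theorem getD_set_self (l : List Int) (n : Nat) (v d : Int) (h : n < l.length) :
    (l.set n v).getD n d = v := by
  simp [List.getD_eq_getElem?_getD, h]

theorem getD_set_ne (l : List Int) (n k : Nat) (v d : Int) (h : k ≠ n) :
    (l.set n v).getD k d = l.getD k d := by
  simp [List.getD_eq_getElem?_getD, List.getElem?_set_ne h.symm]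

theorem pvAStep_inv (a : List Int) (M i jj : Nat) (st : List Int × List Int × Int)
    (hMN : M ≤ a.length) (hi : i < M)
    (hjj : i + 1 ≤ jj) (hjj2 : jj + 1 ≤ i + 1 + (a.length - M))
    (h : pvInnerInv a M i jj st) :
    pvInnerInv a M i (jj + 1) (pvAStep a st ((jj + 1 : Nat) : Int)) := by
  obtain ⟨hb1, hc1, hbv, hcold, hcnew, hcm⟩ := h
  have hjlt : jj + 1 < a.length + 1 := by omega
  have hcast : ((jj + 1 : Nat) : Int) - 1 = ((jj : Nat) : Int) := by push_cast; ring
  unfold pvAStep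
  simp only [hcast, PySem.List.pyGetD_natCast, PySem.List.pySetD_natCast]
  rw [hbv jj (by omega) (by omega), hcold jj (by omega) (by omega), hcm]
  have hV : pvE a (i + 1) (jj + 1) = a.getD jj 0 + max (pvE a (i + 1) jj) (pvH a i jj) := by
    have h2 := pvE_step a i (jj + 1) (by omega)
    simpa using h2
  have hbranch : (if pvE a (i + 1) jj > pvH a i jj
        then st.1.set (jj + 1) (pvE a (i + 1) jj + a.getD jj 0)
        else st.1.set (jj + 1) (pvH a i jj + a.getD jj 0))
      = st.1.set (jj + 1) (pvE a (i + 1) (jj + 1)) := by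
    rw [hV]; split_ifs with hgt <;> congr 1 <;> omega
  rw [hbranch, getD_set_self st.1 (jj + 1) _ 0 (by omega)]
  have hcmax : (if pvH a (i + 1) jj < pvE a (i + 1) (jj + 1)
        then pvE a (i + 1) (jj + 1) else pvH a (i + 1) jj) = pvH a (i + 1) (jj + 1) := by
    rw [pvH_succ a (i + 1) jj (by omega)]
    split_ifs <;> omega
  rw [hcmax]
  refine ⟨by simp [hb1], by simp [hc1], ?_, ?_, ?_, rfl⟩
  · intro k hk1 hk2
    by_cases hkj : k = jj + 1
    · subst hkj; rw [getD_set_self st.1 (jj + 1) _ 0 (by omega)]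
    · rw [getD_set_ne st.1 (jj + 1) k _ 0 hkj]
      exact hbv k hk1 (by omega)
  · intro k hk1 hk2
    rw [getD_set_ne st.2.1 jj k _ 0 (by omega)]
    exact hcold k (by omega) hk2
  · intro k hk1 hk2
    by_cases hkj : k = jj
    · rw [hkj, getD_set_self st.2.1 jj _ 0 (by omega)]
    · rw [getD_set_ne st.2.1 jj k _ 0 hkj]
      exact hcnew k hk1 (by omega)

theorem pvAInner_inv (a : List Int) (M i : Nat) (st : List Int × List Int × Int)
    (hMN : M ≤ a.length) (hi : i < M)
    (h : pvInnerInv a M i (i + 1) st) :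
    ∀ d, d ≤ a.length - M →
      pvInnerInv a M i (i + 1 + d)
        ((PySem.List.pyRange (((i + 1 : Nat) : Int) + 1) (((i + 1 : Nat) : Int) + 1 + (d : Int)) 1).foldl
          (pvAStep a) st) := by
  intro d
  induction d with
  | zero =>
    intro _
    rw [show ((i + 1 : Nat) : Int) + 1 + ((0 : Nat) : Int) = ((i + 1 : Nat) : Int) + 1 by
      push_cast; ring]
    rw [PySem.List.pyRange_one_eq_nil (le_refl _), List.foldl_nil]
    exact h
  | succ d ih =>
    intro hd
    have h1 : ((i + 1 : Nat) : Int) + 1 + ((d + 1 : Nat) : Int)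
        = (((i + 1 : Nat) : Int) + 1 + (d : Int)) + 1 := by push_cast; ring
    rw [h1, PySem.List.pyRange_one_succ_right (by push_cast; omega), List.foldl_append,
      List.foldl_cons, List.foldl_nil]
    have h2 : ((i + 1 : Nat) : Int) + 1 + (d : Int) = (((i + 1 + d) + 1 : Nat) : Int) := by
      push_cast; ring
    have ihh := ih (by omega)
    rw [h2] at ihh ⊢
    exact pvAStep_inv a M i (i + 1 + d) _ hMN hi (by omega) (by omega) ihh

theorem pvARow_inv (a : List Int) (M i : Nat) (bc : List Int × List Int)
    (hMN : M ≤ a.length) (hi : i < M)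
    (h : pvAInv a M i bc) :
    pvAInv a M (i + 1) (pvARow a (a.length : Int) (M : Int) bc ((i + 1 : Nat) : Int)) := by
  obtain ⟨hb1, hc1, hbv, hcv⟩ := h
  have hcast1 : ((i + 1 : Nat) : Int) - 1 = ((i : Nat) : Int) := by push_cast; ring
  unfold pvARow
  simp only [hcast1, PySem.List.pyGetD_natCast, PySem.List.pySetD_natCast]
  rw [hbv i (le_refl _) (by omega), getD_set_self bc.1 (i + 1) _ 0 (by omega),
    show pvE a i i + a.getD i 0 = pvE a (i + 1) (i + 1) from (pvE_base a i (i + 1) (by omega)).symm]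
  have hbound : ((i + 1 : Nat) : Int) + (a.length : Int) - (M : Int) + 1
      = ((i + 1 : Nat) : Int) + 1 + ((a.length - M : Nat) : Int) := by omega
  have hidx2 : ((i + 1 : Nat) : Int) + (a.length : Int) - (M : Int)
      = ((i + 1 + (a.length - M) : Nat) : Int) := by omega
  rw [hbound, hidx2, PySem.List.pySetD_natCast]
  have hinit : pvInnerInv a M i (i + 1)
      (bc.1.set (i + 1) (pvE a (i + 1) (i + 1)), bc.2.set i (pvE a (i + 1) (i + 1)),
        pvE a (i + 1) (i + 1)) := by
    refine ⟨by simp [hb1], by simp [hc1], ?_, ?_, ?_, (pvH_self a (i + 1)).symm⟩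
    · intro k hk1 hk2
      have hk : k = i + 1 := by omega
      rw [hk, getD_set_self bc.1 (i + 1) _ 0 (by omega)]
    · intro k hk1 hk2
      rw [getD_set_ne bc.2 i k _ 0 (by omega)]
      exact hcv k (by omega) hk2
    · intro k hk1 hk2
      omega
  have hfin := pvAInner_inv a M i _ hMN hi hinit (a.length - M) (le_refl _)
  obtain ⟨ib1, ic1, ibv, _, icnew, icm⟩ := hfin
  rw [icm]
  refine ⟨by simpa using ib1, by simpa using ic1, ?_, ?_⟩
  · intro k hk1 hk2
    exact ibv k hk1 (by omega)
  · intro k hk1 hk2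
    by_cases hkj : k = i + 1 + (a.length - M)
    · rw [hkj, getD_set_self _ (i + 1 + (a.length - M)) _ 0 (by omega)]
    · rw [getD_set_ne _ (i + 1 + (a.length - M)) k _ 0 hkj]
      exact icnew k hk1 (by omega)

theorem pvAOuter_inv (a : List Int) (M : Nat) (hMN : M ≤ a.length) :
    ∀ i, i ≤ M →
      pvAInv a M i
        ((PySem.List.pyRange 1 ((i : Nat) + 1 : Int) 1).foldl (pvARow a (a.length : Int) (M : Int))
          (List.replicate (a.length + 1) 0, List.replicate (a.length + 1) 0)) := by
  have hrep : ∀ k : Nat, (List.replicate (a.length + 1) (0 : Int)).getD k 0 = 0 := by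
    intro k
    simp [List.getD_eq_getElem?_getD, List.getElem?_replicate]
    split <;> rfl
  intro i
  induction i with
  | zero =>
    intro _
    rw [PySem.List.pyRange_one_eq_nil (by omega), List.foldl_nil]
    exact ⟨by simp, by simp, fun k _ _ => by rw [hrep k, pvE_zero],
      fun k _ _ => by rw [hrep k, pvH_zero]⟩
  | succ i ih =>
    intro hi1
    have hc : ((i + 1 : Nat) : Int) + 1 = (((i : Nat) : Int) + 1) + 1 := by push_cast; ring
    rw [hc, PySem.List.pyRange_one_succ_right (by omega), List.foldl_append,
      List.foldl_cons, List.foldl_nil]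
    have hc2 : ((i : Nat) : Int) + 1 = ((i + 1 : Nat) : Int) := by push_cast; ring
    have ihh := ih (by omega)
    rw [hc2] at ihh ⊢
    exact pvARow_inv a M i _ hMN (by omega) ihh

theorem mss_m_sep_eq (a : List Int) (m : Int) :
    mss_m_sep a m =
      if (a.length : Int) < m ∨ m < 1 then 0
      else
        (PySem.List.pyRange m ((a.length : Int) + 1) 1).foldl
          (fun asum j =>
            if asum < PySem.List.pyGetD
                ((PySem.List.pyRange 1 (m + 1) 1).foldl (pvARow a (a.length : Int) m)
                  (List.replicate (a.length + 1) 0, List.replicate (a.length + 1) 0)).1 j 0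
              then PySem.List.pyGetD
                ((PySem.List.pyRange 1 (m + 1) 1).foldl (pvARow a (a.length : Int) m)
                  (List.replicate (a.length + 1) 0, List.replicate (a.length + 1) 0)).1 j 0
              else asum) 0 := rfl

theorem final_fold (a : List Int) (M : Nat) (b : List Int)
    (hbv : ∀ k, M ≤ k → k ≤ a.length → b.getD k 0 = pvE a M k) :
    ∀ d, M + d ≤ a.length →
      (PySem.List.pyRange (M : Int) ((M : Int) + (d : Int) + 1) 1).foldl
        (fun asum j => if asum < PySem.List.pyGetD b j 0
          then PySem.List.pyGetD b j 0 else asum) 0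
      = max 0 (pvH a M (M + d)) := by
  intro d
  induction d with
  | zero =>
    intro _
    rw [show (M : Int) + ((0 : Nat) : Int) + 1 = (M : Int) + 1 by push_cast; ring,
      PySem.List.pyRange_one_singleton, List.foldl_cons, List.foldl_nil,
      PySem.List.pyGetD_natCast, hbv M (le_refl _) (by omega), Nat.add_zero, pvH_self]
    split_ifs <;> omega
  | succ d ih =>
    intro hd
    rw [show (M : Int) + ((d + 1 : Nat) : Int) + 1 = ((M : Int) + (d : Int) + 1) + 1 by
        push_cast; ring,
      PySem.List.pyRange_one_succ_right (by omega), List.foldl_append,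
      List.foldl_cons, List.foldl_nil, ih (by omega),
      show (M : Int) + (d : Int) + 1 = ((M + d + 1 : Nat) : Int) by push_cast; ring,
      PySem.List.pyGetD_natCast, hbv (M + d + 1) (by omega) (by omega),
      show M + (d + 1) = M + d + 1 from rfl,
      pvH_succ a M (M + d) (by omega)]
    split_ifs <;> omega

theorem a_eq (a : List Int) (m : Int) (h1 : ¬((a.length : Int) < m ∨ m < 1)) :
    mss_m_sep a m = max 0 (pvH a m.toNat a.length) := by
  obtain ⟨M, rfl⟩ : ∃ M : Nat, m = (M : Int) := ⟨m.toNat, by omega⟩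
  have hM1 : 1 ≤ M := by omega
  have hMN : M ≤ a.length := by omega
  rw [mss_m_sep_eq, if_neg h1]
  obtain ⟨_, _, hbv, _⟩ := pvAOuter_inv a M hMN M (le_refl _)
  have hff := final_fold a M _ (fun k hk1 hk2 => hbv k hk1 (by omega))
    (a.length - M) (by omega)
  rw [show ((a.length : Nat) : Int) + 1 = (M : Int) + ((a.length - M : Nat) : Int) + 1 by omega]
  rw [hff, show M + (a.length - M) = a.length from by omega, Int.toNat_natCast]

-- ===== VERDICT (by name: the statement is the Claim_ definition above) =====
theorem mss_m_sep_spec : Claim_equal_mss_m_sep := by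
  unfold Claim_equal_mss_m_sep
  intro a m _
  unfold Spec_mss_m_sep
  by_cases h1 : ((a.length : Int) < m ∨ m < 1)
  · unfold mss_m_sep mss_m_sep_alt
    rw [if_pos h1, if_pos h1]
  · rw [a_eq a m h1, alt_eq a m h1]
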